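-- pv_equiv track=rewrite | github.com/miliar/Code_Jam_Webscraper | solutions_python/Problem_178/3904.py | solve
-- ===== SOURCE A (Python) =====
-- def solve(data):
--   s = data[0]
--   flips = 0
--   previous = '+'
--   for p in reversed(s):
--     if p != previous:
--       flips += 1
--       previous = p
--   return flips
-- ===== SOURCE B (Python) =====
-- def solve(data):
--     s = data[0]
--     runs = 0
--     last = None
--     i = 0
--     n = len(s)
--     while i < n:
--         last = s[i]
--         while i < n and s[i] == last:
--             i += 1
--         runs += 1
--     if last is None:
--         return 0
--     return runs if last != '+' else runs - 1
-- ===== Notes on version B (the rewrite author's own statement) =====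
-- stated objective: alternative
-- what changed: Builds the run-length structure explicitly (a forward two-level loop that skips each maximal run at once, counting runs and remembering the last run's character) and then computes the answer by a closed formula: runs if the last character is not '+', else runs-1; A instead threads a '+' sentinel through a reversed elementwise scan counting flips.
import Mathlib
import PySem

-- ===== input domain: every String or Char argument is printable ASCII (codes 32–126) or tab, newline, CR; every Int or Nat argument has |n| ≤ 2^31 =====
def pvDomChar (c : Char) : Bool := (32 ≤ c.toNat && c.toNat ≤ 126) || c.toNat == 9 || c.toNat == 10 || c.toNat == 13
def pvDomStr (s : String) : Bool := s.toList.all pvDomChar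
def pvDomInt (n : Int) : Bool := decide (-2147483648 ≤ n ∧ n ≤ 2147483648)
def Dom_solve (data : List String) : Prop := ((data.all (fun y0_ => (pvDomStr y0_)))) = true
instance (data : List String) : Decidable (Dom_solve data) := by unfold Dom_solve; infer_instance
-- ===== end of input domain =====

-- B replaces A's reversed sentinel flip-scan by an explicit run-length pass (skip each maximal run, count runs, keep the last run's char) followed by a closed boundary formula; same cost, different decomposition.


-- ===== PORT A =====
-- s = data[0] (Pre_solve guarantees data ≠ [], so headD's default is never used);
-- the for-loop over reversed(s) is a foldl over s.toList.reverse carrying (flips, previous).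
def solve (data : List String) : Int :=
  let s := (data.headD "").toList
  (s.reverse.foldl (fun (st : Int × Char) p => if p ≠ st.2 then (st.1 + 1, p) else st) (0, '+')).1

-- ===== PORT B =====
-- outer while: take the current char as `last`, skip its maximal run (the inner
-- `while s[i] == last: i += 1` is exactly dropWhile), count one run; then the formula.
def runsGo (l : List Char) (runs : Int) (last : Option Char) : Int × Option Char :=
  match l with
  | [] => (runs, last)
  | a :: t => runsGo (t.dropWhile (· == a)) (runs + 1) (some a)
termination_by l.length
decreasing_by
  exact Nat.lt_succ_of_le (List.length_dropWhile_le _ _)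

def solve_alt (data : List String) : Int :=
  let s := (data.headD "").toList
  match runsGo s 0 none with
  | (_, none) => 0
  | (runs, some l) => if l ≠ '+' then runs else runs - 1

-- ===== PRECONDITION & SPEC =====
-- Pre_ excludes only the empty list, on which A raises IndexError at data[0] (and B likewise).
def Pre_solve (data : List String) : Prop := data ≠ []
instance (data : List String) : Decidable (Pre_solve data) := by unfold Pre_solve; infer_instance
def pvWitness_solve : List String := (["--++-"])
def Spec_solve (data : List String) (out : Int) : Prop := out = solve_alt data
instance (data : List String) (out : Int) : Decidable (Spec_solve data out) := by unfold Spec_solve; infer_instance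

-- ===== CLAIM (what is proved, stated in full; the proofs are below) =====
def Claim_equal_solve : Prop := ∀ (data : List String), Dom_solve data → Pre_solve data → Spec_solve data (solve data)

-- ===== LEMMAS AND PROOFS =====

-- number of unequal adjacent pairs
def pvTrans : List Char → Int
  | [] => 0
  | [_] => 0
  | a :: b :: t => (if a ≠ b then 1 else 0) + pvTrans (b :: t)

-- A's value as a closed recursion: transitions + boundary term at the last char
def pvBv (l : List Char) : Int := pvTrans l + (if l.getLastD '+' ≠ '+' then 1 else 0)

theorem pvBv_cons (a : Char) (t : List Char) :
    pvBv (a :: t) = pvBv t + (if a ≠ t.headD '+' then 1 else 0) := by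
  cases t with
  | nil => simp [pvBv, pvTrans]
  | cons b t' =>
      simp only [pvBv, pvTrans, List.getLastD_cons, List.headD_cons]
      ring_nf

-- A's foldl over the reversed list, as a foldr, computes (pvBv l, headD l '+')
theorem foldr_A (l : List Char) :
    l.foldr (fun p (st : Int × Char) => if p ≠ st.2 then (st.1 + 1, p) else st) (0, '+')
      = (pvBv l, l.headD '+') := by
  induction l with
  | nil => simp [pvBv, pvTrans]
  | cons a t ih =>
      simp only [List.foldr_cons, ih, List.headD_cons]
      rw [pvBv_cons]
      by_cases h : a = t.headD '+' <;>
        simp [List.headD_eq_head?_getD] at h ⊢ <;> simp [h]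

-- skipping the leading run of a: the transition count loses exactly one boundary
theorem pvTrans_dropWhile (t : List Char) (a : Char) :
    pvTrans (a :: t) =
      (if t.dropWhile (· == a) = [] then 0 else 1 + pvTrans (t.dropWhile (· == a))) := by
  induction t generalizing a with
  | nil => simp [pvTrans]
  | cons b t' ih =>
      by_cases h : b = a
      · subst h
        simp only [List.dropWhile_cons, beq_self_eq_true, if_true]
        have := ih b
        simpa [pvTrans] using this
      · have hba : (b == a) = false := by simp [h]
        have hab : a ≠ b := fun e => h (Eq.symm e)
        simp only [List.dropWhile_cons, hba, if_false, pvTrans]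
        simp [hab]

theorem getLastD_dropWhile (t : List Char) (a d : Char)
    (hne : t.dropWhile (· == a) ≠ []) :
    (a :: t).getLastD d = (t.dropWhile (· == a)).getLastD d := by
  induction t generalizing a with
  | nil => simp at hne
  | cons b t' ih =>
      by_cases h : b = a
      · subst h
        simp only [List.dropWhile_cons, beq_self_eq_true, if_true] at hne ⊢
        rw [show (b :: b :: t').getLastD d = (b :: t').getLastD d by simp [List.getLastD_cons],
            ih b hne]
      · have hba : (b == a) = false := by simp [h]
        simp [List.dropWhile_cons, hba, List.getLastD_cons]

theorem getLastD_all_eq (t : List Char) (a d : Char)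
    (he : t.dropWhile (· == a) = []) : (a :: t).getLastD d = a := by
  induction t generalizing a with
  | nil => simp
  | cons b t' ih =>
      by_cases h : b = a
      · subst h
        simp only [List.dropWhile_cons, beq_self_eq_true, if_true] at he
        rw [show (b :: b :: t').getLastD d = (b :: t').getLastD d by simp [List.getLastD_cons]]
        exact ih b he
      · simp [List.dropWhile_cons, h] at he

-- B's run loop computes transitions+1 runs and the last character
theorem runsGo_spec (l : List Char) (hl : l ≠ []) (r : Int) (last : Option Char) :
    runsGo l r last = (r + pvTrans l + 1, some (l.getLastD '+')) := by
  induction hn : l.length using Nat.strong_induction_on generalizing l r last with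
  | _ n ih =>
    cases l with
    | nil => exact absurd rfl hl
    | cons a t =>
      rw [runsGo]
      by_cases he : t.dropWhile (· == a) = []
      · rw [he, runsGo]
        have h1 : pvTrans (a :: t) = 0 := by rw [pvTrans_dropWhile, he]; simp
        have h2 := getLastD_all_eq t a '+' he
        rw [h1, h2]
        ring_nf
      · have hlen : (t.dropWhile (· == a)).length < n := by
          subst hn
          exact Nat.lt_succ_of_le (List.length_dropWhile_le _ _)
        rw [ih _ hlen _ he _ _ rfl]
        have h1 := pvTrans_dropWhile t a
        rw [if_neg he] at h1
        have h2 := getLastD_dropWhile t a '+' he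
        rw [h2, h1]
        ring_nf

-- ===== VERDICT (by name: the statement is the Claim_ definition above) =====
theorem solve_spec : Claim_equal_solve := by
  intro data _ _
  show solve data = solve_alt data
  simp only [solve, solve_alt]
  rcases hs : (data.headD "").toList with _ | ⟨a, t⟩
  · simp [runsGo]
  · rw [List.foldl_reverse, foldr_A, runsGo_spec (a :: t) (by simp) 0 none]
    simp only [pvBv, zero_add]
    by_cases h : (a :: t).getLastD '+' = '+'
    · rw [if_neg (fun hc => hc h), if_neg (fun hc => hc h)]; omega
    · rw [if_pos h, if_pos h]
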